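-- pv_equiv track=rewrite | github.com/ilkeraydogdu/PofuAi | core/AI/content_categorizer.py | _organize_hierarchical
-- ===== SOURCE A (Python) =====
-- from typing import Dict, List, Any, Optional, Tuple, Set
-- from collections import defaultdict, Counter
--
-- def _organize_hierarchical(categories: List[Dict[str, Any]]) -> Dict[str, List[str]]:
--     """Kategorileri hiyerarşik olarak organize et"""
--     organized = defaultdict(list)
--
--     for cat_info in categories:
--         if cat_info.get('type') == 'parent':
--             parent = cat_info['category']
--             # Bu ana kategorinin alt kategorilerini bul
--             subcategories = [c['category'] for c in categories
--                            if c.get('parent') == parent and c.get('type') == 'subcategory']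
--             organized[parent] = subcategories
--
--     return dict(organized)
-- ===== SOURCE B (Python) =====
-- def _organize_hierarchical(categories):
--     """Kategorileri hiyerarşik olarak organize et (two flat passes + grouping index)"""
--     parents = []
--     seen = set()
--     for c in categories:
--         if c.get('type') == 'parent':
--             p = c['category']
--             if p not in seen:
--                 seen.add(p)
--                 parents.append(p)
--     groups = {}
--     for c in categories:
--         if c.get('type') == 'subcategory':
--             par = c.get('parent')
--             if par in seen:
--                 groups.setdefault(par, []).append(c['category'])
--     return {p: groups.get(p, []) for p in parents}
-- ===== Notes on version B (the rewrite author's own statement) =====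
-- stated objective: alternative
-- what changed: Replaces A's per-parent inner scan over all categories with two flat passes: one collecting parent names in first-seen order, one grouping subcategories into a dict keyed by parent, then assembling the result by lookup; avoids rescanning per parent (O(n*p) -> O(n)) though a timing run's inputs showed no measurable gain.
import Mathlib
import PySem

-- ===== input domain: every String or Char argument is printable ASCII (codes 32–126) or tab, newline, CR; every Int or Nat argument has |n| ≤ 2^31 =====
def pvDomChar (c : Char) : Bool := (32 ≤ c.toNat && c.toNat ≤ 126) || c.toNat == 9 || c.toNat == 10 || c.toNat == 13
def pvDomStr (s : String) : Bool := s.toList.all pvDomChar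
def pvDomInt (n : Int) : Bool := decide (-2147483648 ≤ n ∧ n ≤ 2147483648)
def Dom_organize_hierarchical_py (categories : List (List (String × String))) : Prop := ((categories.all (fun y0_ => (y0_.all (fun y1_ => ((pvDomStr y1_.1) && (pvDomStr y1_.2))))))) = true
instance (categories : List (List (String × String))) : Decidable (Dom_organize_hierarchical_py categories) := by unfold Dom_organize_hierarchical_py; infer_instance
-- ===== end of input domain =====

-- B replaces A's per-parent inner scan by two flat passes with a grouping dict keyed by parent (alternative algorithm; return-value equivalence).

-- ===== PORT A =====
-- helper: Python's d.get(k) / d[k] on one dictionary entry (first-match lookup)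
def pvGet (c : List (String × String)) (k : String) : Option String := (PySem.Dict.mk c).get? k

-- A's inner list comprehension: subcategories of `parent`
def pvSubs (categories : List (List (String × String))) (parent : String) : List String :=
  (categories.filter (fun c => pvGet c "parent" == some parent && pvGet c "type" == some "subcategory")).map
    (fun c => (pvGet c "category").getD "")

-- A's loop body ('cat_info["category"]' is total here via getD ""; Pre_ guarantees the key is present)
def pvStepA (categories : List (List (String × String)))
    (organized : PySem.Dict String (List String)) (cat_info : List (String × String)) :
    PySem.Dict String (List String) :=
  if pvGet cat_info "type" == some "parent" then
    organized.insert ((pvGet cat_info "category").getD "") (pvSubs categories ((pvGet cat_info "category").getD ""))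
  else organized

def organize_hierarchical_py (categories : List (List (String × String))) : List (String × List String) :=
  (categories.foldl (pvStepA categories) PySem.Dict.empty).items

-- ===== PORT B =====
-- B's first pass body: collect parent names in first-seen order (ordered list + seen set)
def pvStepP (st : List String × PySem.Set String) (c : List (String × String)) :
    List String × PySem.Set String :=
  if pvGet c "type" == some "parent" then
    let p := (pvGet c "category").getD ""
    if p ∈ st.2 then st else (st.1 ++ [p], PySem.Set.add st.2 p)
  else st

-- B's second pass body: group subcategories by parent (groups.setdefault(par, []).append(...))
def pvStepG (seen : PySem.Set String) (g : PySem.Dict String (List String))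
    (c : List (String × String)) : PySem.Dict String (List String) :=
  if pvGet c "type" == some "subcategory" then
    match pvGet c "parent" with
    | some par =>
        if par ∈ seen then g.modify par [] (fun l => l ++ [(pvGet c "category").getD ""]) else g
    | none => g
  else g

def organize_hierarchical_py_alt (categories : List (List (String × String))) : List (String × List String) :=
  let st := categories.foldl pvStepP ([], PySem.Set.ofList [])
  let groups := categories.foldl (pvStepG st.2) PySem.Dict.empty
  st.1.map (fun p => (p, groups.getD p []))

-- ===== PRECONDITION & SPEC =====
-- Pre_ excludes exactly the inputs where Python A raises KeyError: a 'parent'-typed entry without a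
-- 'category' key, or a 'subcategory'-typed entry whose 'parent' names some parent category but which
-- itself has no 'category' key.
def Pre_organize_hierarchical_py (categories : List (List (String × String))) : Prop :=
  ∀ c ∈ categories,
    ((pvGet c "type" == some "parent") = true → (pvGet c "category").isSome = true) ∧
    ((pvGet c "type" == some "subcategory") = true →
      (∃ d ∈ categories, (pvGet d "type" == some "parent") = true ∧
        (pvGet d "category").isSome = true ∧ pvGet d "category" = pvGet c "parent") →
      (pvGet c "category").isSome = true)
instance (categories : List (List (String × String))) : Decidable (Pre_organize_hierarchical_py categories) := by
  unfold Pre_organize_hierarchical_py; infer_instance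

def pvWitness_organize_hierarchical_py : (List (List (String × String))) :=
  [[("type", "parent"), ("category", "A")],
   [("type", "subcategory"), ("parent", "A"), ("category", "A1")],
   [("type", "parent"), ("category", "B")]]

def Spec_organize_hierarchical_py (categories : List (List (String × String))) (out : List (String × List String)) : Prop := out = organize_hierarchical_py_alt categories
instance (categories : List (List (String × String))) (out : List (String × List String)) : Decidable (Spec_organize_hierarchical_py categories out) := by unfold Spec_organize_hierarchical_py; infer_instance

-- ===== CLAIM (what is proved, stated in full; the proofs are below) =====
def Claim_equal_organize_hierarchical_py : Prop := ∀ (categories : List (List (String × String))), Dom_organize_hierarchical_py categories → Pre_organize_hierarchical_py categories → Spec_organize_hierarchical_py categories (organize_hierarchical_py categories)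

-- ===== LEMMAS AND PROOFS =====

-- Joint invariant of A's dict-building fold and B's first (parents-collecting) fold.
lemma pv_foldA_items (categories : List (List (String × String))) :
    ∀ (rs : List (List (String × String))) (ps : List String) (seen : PySem.Set String)
      (acc : PySem.Dict String (List String)),
      (∀ x, x ∈ seen ↔ x ∈ ps) →
      acc.items = ps.map (fun p => (p, pvSubs categories p)) →
      (rs.foldl (pvStepA categories) acc).items
          = (rs.foldl pvStepP (ps, seen)).1.map (fun p => (p, pvSubs categories p))
        ∧ (∀ x, x ∈ (rs.foldl pvStepP (ps, seen)).2 ↔ x ∈ (rs.foldl pvStepP (ps, seen)).1) := by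
  intro rs
  induction rs with
  | nil => intro ps seen acc hm hacc; exact ⟨hacc, hm⟩
  | cons c rs ih =>
    intro ps seen acc hm hacc
    simp only [List.foldl_cons]
    by_cases ht : (pvGet c "type" == some "parent") = true
    · obtain ⟨p, hp⟩ : ∃ p, (pvGet c "category").getD "" = p := ⟨_, rfl⟩
      have hcontains : acc.contains p = (decide (p ∈ ps)) := by
        rw [PySem.Dict.contains_eq_decide_mem_keys]
        have hk : acc.keys = ps := by
          simp [PySem.Dict.keys, hacc, List.map_map, Function.comp_def]
        rw [hk]
      by_cases hin : p ∈ seen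
      · have hA : pvStepA categories acc c = acc := by
          apply PySem.Dict.ext
          rw [pvStepA, if_pos ht, hp,
            PySem.Dict.items_insert_of_contains _ _ (by simp [hcontains, (hm p).1 hin]),
            hacc, List.map_map]
          apply List.map_congr_left
          intro q _
          simp only [Function.comp_def]
          by_cases hq : q = p
          · subst hq; simp
          · simp [hq]
        have hP : pvStepP (ps, seen) c = (ps, seen) := by
          rw [pvStepP, if_pos ht]
          simp [hp, hin]
        rw [hA, hP]
        exact ih ps seen acc hm hacc
      · have hps : p ∉ ps := fun h => hin ((hm p).2 h)
        have hA : pvStepA categories acc c = acc.insert p (pvSubs categories p) := by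
          rw [pvStepA, if_pos ht, hp]
        have hP : pvStepP (ps, seen) c = (ps ++ [p], PySem.Set.add seen p) := by
          rw [pvStepP, if_pos ht]
          simp [hp, hin]
        rw [hA, hP]
        apply ih
        · intro x
          rw [PySem.Set.mem_add, hm x]
          simp [or_comm]
        · rw [PySem.Dict.items_insert_of_not_contains _ _ (by simp [hcontains, hps]), hacc]
          simp
    · have hA : pvStepA categories acc c = acc := by rw [pvStepA, if_neg ht]
      have hP : pvStepP (ps, seen) c = (ps, seen) := by rw [pvStepP, if_neg ht]
      rw [hA, hP]
      exact ih ps seen acc hm hacc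

-- B's grouping fold computes, at each key in `seen`, exactly A's inner comprehension over the scanned list.
lemma pv_foldG (seen : PySem.Set String) (p : String) (hp : p ∈ seen) :
    ∀ (rs : List (List (String × String))) (g : PySem.Dict String (List String)),
      (rs.foldl (pvStepG seen) g).getD p [] = g.getD p [] ++ pvSubs rs p := by
  intro rs
  induction rs with
  | nil => intro g; simp [pvSubs]
  | cons c rs ih =>
    intro g
    simp only [List.foldl_cons]
    rw [ih]
    by_cases ht : (pvGet c "type" == some "subcategory") = true
    · cases hpar : pvGet c "parent" with
      | none =>
        have hg : pvStepG seen g c = g := by rw [pvStepG, if_pos ht, hpar]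
        rw [hg]
        have : (pvGet c "parent" == some p) = false := by simp [hpar]
        simp [pvSubs, this]
      | some par =>
        by_cases hpe : par = p
        · subst hpe
          have hg : pvStepG seen g c
              = if par ∈ seen then g.modify par [] (fun l => l ++ [(pvGet c "category").getD ""]) else g := by
            rw [pvStepG, if_pos ht, hpar]
          rw [hg, if_pos hp, PySem.Dict.getD_modify_self]
          simp [pvSubs, hpar, ht, List.append_assoc]
        · have hm : pvStepG seen g c
              = if par ∈ seen then g.modify par [] (fun l => l ++ [(pvGet c "category").getD ""]) else g := by
            rw [pvStepG, if_pos ht, hpar]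
          have hg : (pvStepG seen g c).getD p [] = g.getD p [] := by
            rw [hm]
            by_cases hin : par ∈ seen
            · rw [if_pos hin, PySem.Dict.getD_modify_of_ne _ _ _ (Ne.symm hpe)]
            · rw [if_neg hin]
          rw [hg]
          have : (pvGet c "parent" == some p) = false := by simp [hpar, hpe]
          simp [pvSubs, this]
    · have hg : pvStepG seen g c = g := by rw [pvStepG, if_neg ht]
      rw [hg]
      have : (pvGet c "type" == some "subcategory") = false := by simpa using ht
      simp [pvSubs, this, Bool.and_comm]

-- ===== VERDICT (by name: the statement is the Claim_ definition above) =====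
theorem organize_hierarchical_py_spec : Claim_equal_organize_hierarchical_py := by
  intro categories _ _
  unfold Spec_organize_hierarchical_py organize_hierarchical_py organize_hierarchical_py_alt
  obtain ⟨hitems, hmem⟩ :=
    pv_foldA_items categories categories [] (PySem.Set.ofList []) PySem.Dict.empty
      (by intro x; simp) (by rfl)
  rw [hitems]
  apply List.map_congr_left
  intro p hpmem
  have hp : p ∈ (categories.foldl pvStepP ([], PySem.Set.ofList [])).2 :=
    (hmem p).2 hpmem
  rw [pv_foldG _ p hp categories PySem.Dict.empty]
  simp
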